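-- pv_equiv track=rewrite | github.com/tommy-stu191/Substitution-Cipher-Project | substitution_cipher_main.py | affine_alph_decrypt
-- ===== SOURCE A (Python) =====
-- def a_inverse(a):
--     """
--     Finds the value of a-inverse.
--     :param a: integer parameter for affine cipher
--     :return: the inverse of a
--     """
--     for integer in range(0, 26):
--         # Integer is the inverse of a when condition is met
--         if a*integer % 26 == 1:
--             return integer
--
-- def affine_alph_decrypt(a, b):
--     """
--     Using the inverse of parameter a and inputted integers for the Affine Cipher,
--     generates the cipher list and returns it.
--     :param a: integer for affine cipher
--     :param b: integer for affine cipher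
--     :return: the affine alphabet for encryption
--     """
--     alpha_lower = ['a', 'b', 'c', 'd', 'e', 'f', 'g', 'h', 'i', 'j', 'k', 'l', 'm', 'n', 'o', 'p', 'q', 'r', 's', 't',
--                    'u', 'v', 'w', 'x', 'y', 'z']
--     count = 0
--     affine_cipher = []
--     new_a = a_inverse(a)
--     # Loop until the affine cipher alphabet is full
--     while len(affine_cipher) != 26:
--         for char in alpha_lower:
--             # Find the index of the current character for calculation
--             alpha_index = alpha_lower.index(char)
--             # Finding and appending the correct letter
--             if new_a*(alpha_index-b) % 26 == count:
--                 affine_cipher.append(char)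
--                 count += 1
--     # Joining the list into a string
--     affine_alphabet = ''.join(affine_cipher)
--
--     return affine_alphabet
-- ===== SOURCE B (Python) =====
-- def a_inverse(a):
--     """
--     Finds the value of a-inverse.
--     :param a: integer parameter for affine cipher
--     :return: the inverse of a
--     """
--     for integer in range(0, 26):
--         if a*integer % 26 == 1:
--             return integer
--
--
-- def affine_alph_decrypt(a, b):
--     """
--     Single-pass scatter: place each letter directly at its computed cipher index.
--     """
--     new_a = a_inverse(a)
--     result = [None] * 26
--     for i, ch in enumerate('abcdefghijklmnopqrstuvwxyz'):
--         result[new_a*(i-b) % 26] = ch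
--     return ''.join(c for c in result if c is not None)
-- ===== Notes on version B (the rewrite author's own statement) =====
-- stated objective: simpler
-- what changed: Instead of repeatedly rescanning the whole alphabet and appending the letter whose key matches a running count, B makes one pass over the alphabet and scatters each letter directly into slot a_inverse(a)*(i-b) % 26 of a fixed 26-slot list.
import Mathlib
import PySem

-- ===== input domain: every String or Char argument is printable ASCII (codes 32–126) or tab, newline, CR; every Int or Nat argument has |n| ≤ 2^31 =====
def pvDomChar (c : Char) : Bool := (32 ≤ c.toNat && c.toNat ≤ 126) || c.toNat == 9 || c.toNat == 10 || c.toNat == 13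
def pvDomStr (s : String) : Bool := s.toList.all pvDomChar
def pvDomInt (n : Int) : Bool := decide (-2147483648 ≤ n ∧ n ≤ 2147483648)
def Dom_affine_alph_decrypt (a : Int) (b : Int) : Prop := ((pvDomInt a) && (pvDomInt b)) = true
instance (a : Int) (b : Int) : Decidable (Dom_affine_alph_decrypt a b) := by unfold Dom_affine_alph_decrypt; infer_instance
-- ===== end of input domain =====

-- B replaces A's repeated full-alphabet rescans with count-matching by a single
-- scatter pass that places each letter directly at its computed cipher index (objective: simpler).

-- ===== PORT A =====
def alpha_lower : List Char := ['a','b','c','d','e','f','g','h','i','j','k','l','m','n','o','p','q','r','s','t','u','v','w','x','y','z']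

-- for-loop with early return over range(0, 26); None when no inverse exists
def a_inverse (a : Int) : Option Int :=
  (PySem.List.pyRange 0 26 1).findSome? (fun integer =>
    if PySem.Int.mod (a * integer) 26 == 1 then some integer else none)

-- the while-loop of A; fuel 27 exceeds the ≤ 26 passes the Python loop ever makes
-- when a_inverse succeeded (each pass appends the letter whose key equals count)
def loopA (new_a b : Int) : Nat → Int → List Char → List Char
  | 0, _, cipher => cipher
  | fuel+1, count, cipher =>
    if cipher.length == 26 then cipher
    else
      let st := alpha_lower.foldl (fun (st : Int × List Char) ch =>
        -- alpha_lower.index(char): always found, so the .getD 0 default is never used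
        let alpha_index : Int := (PySem.List.index? alpha_lower ch).getD 0
        if PySem.Int.mod (new_a * (alpha_index - b)) 26 == st.1 then (st.1 + 1, st.2 ++ [ch]) else st)
        (count, cipher)
      loopA new_a b fuel st.1 st.2

def cipherA (a b : Int) : List Char :=
  match a_inverse a with
  | none => []  -- Python raises TypeError (None * int) here: excluded by Pre_
  | some new_a => loopA new_a b 27 0 []

def affine_alph_decrypt (a : Int) (b : Int) : String := String.ofList (cipherA a b)

-- ===== PORT B =====
-- result[new_a*(i-b) % 26] = ch; the index is in [0,26) so .toNat is exact
def scatterB (new_a b : Int) : List (Option Char) :=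
  (PySem.List.enumerate alpha_lower).foldl (fun res (p : Int × Char) =>
    res.set (PySem.Int.mod (new_a * (p.1 - b)) 26).toNat (some p.2))
    (List.replicate 26 none)

def cipherB (a b : Int) : List Char :=
  match a_inverse a with
  | none => []  -- Python B raises TypeError here too: excluded by Pre_
  | some new_a => (scatterB new_a b).filterMap id

def affine_alph_decrypt_alt (a : Int) (b : Int) : String := String.ofList (cipherB a b)

-- ===== PRECONDITION & SPEC =====
-- Pre_ excludes exactly the a non-invertible mod 26, where a_inverse returns None and
-- both A and B raise TypeError in the multiplication new_a*(i-b).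
def Pre_affine_alph_decrypt (a : Int) (b : Int) : Prop := Int.gcd a 26 = 1
instance (a : Int) (b : Int) : Decidable (Pre_affine_alph_decrypt a b) := by unfold Pre_affine_alph_decrypt; infer_instance
def pvWitness_affine_alph_decrypt : Int × Int := (3, 5)

def Spec_affine_alph_decrypt (a : Int) (b : Int) (out : String) : Prop := out = affine_alph_decrypt_alt a b
instance (a : Int) (b : Int) (out : String) : Decidable (Spec_affine_alph_decrypt a b out) := by unfold Spec_affine_alph_decrypt; infer_instance

-- ===== CLAIM (what is proved, stated in full; the proofs are below) =====
def Claim_equal_affine_alph_decrypt : Prop := ∀ (a : Int) (b : Int), Dom_affine_alph_decrypt a b → Pre_affine_alph_decrypt a b → Spec_affine_alph_decrypt a b (affine_alph_decrypt a b)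

-- ===== LEMMAS AND PROOFS =====

-- both ports read a only through a*i % 26 and b only through new_a*(i-b) % 26,
-- so everything depends on a, b mod 26 only; then a finite kernel check closes it.

theorem a_inverse_emod (a : Int) : a_inverse a = a_inverse (a % 26) := by
  unfold a_inverse
  congr 1
  funext i
  have h : a * i % 26 = a % 26 * i % 26 := by
    rw [Int.mul_emod a i, Int.mul_emod (a % 26) i, Int.emod_emod_of_dvd a dvd_rfl]
  simp [h]

theorem key_emod (n x b : Int) :
    PySem.Int.mod (n * (x - b)) 26 = PySem.Int.mod (n * (x - b % 26)) 26 := by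
  have h : n * (x - b) % 26 = n * (x - b % 26) % 26 := by
    rw [Int.mul_emod n (x - b), Int.mul_emod n (x - b % 26),
      Int.sub_emod x b, Int.sub_emod x (b % 26), Int.emod_emod_of_dvd b dvd_rfl]
  simp [h]

theorem loopA_emod (n b : Int) (fuel : Nat) (count : Int) (cipher : List Char) :
    loopA n b fuel count cipher = loopA n (b % 26) fuel count cipher := by
  induction fuel generalizing count cipher with
  | zero => rfl
  | succ fuel ih =>
    simp only [loopA]
    split
    · rfl
    · rw [show (fun (st : Int × List Char) ch =>
          let alpha_index : Int := (PySem.List.index? alpha_lower ch).getD 0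
          if PySem.Int.mod (n * (alpha_index - b)) 26 == st.1 then (st.1 + 1, st.2 ++ [ch]) else st)
        = (fun (st : Int × List Char) ch =>
          let alpha_index : Int := (PySem.List.index? alpha_lower ch).getD 0
          if PySem.Int.mod (n * (alpha_index - b % 26)) 26 == st.1 then (st.1 + 1, st.2 ++ [ch]) else st)
        from funext fun st => funext fun ch => by simp only [key_emod (b := b)]]
      exact ih _ _

theorem cipherA_emod (a b : Int) : cipherA a b = cipherA (a % 26) (b % 26) := by
  unfold cipherA
  rw [a_inverse_emod a]
  cases a_inverse (a % 26) with
  | none => rfl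
  | some n => exact loopA_emod n b 27 0 []

theorem scatterB_emod (n b : Int) : scatterB n b = scatterB n (b % 26) := by
  unfold scatterB
  rw [show (fun (res : List (Option Char)) (p : Int × Char) =>
        res.set (PySem.Int.mod (n * (p.1 - b)) 26).toNat (some p.2))
      = (fun (res : List (Option Char)) (p : Int × Char) =>
        res.set (PySem.Int.mod (n * (p.1 - b % 26)) 26).toNat (some p.2))
      from funext fun res => funext fun p => by rw [key_emod]]

theorem cipherB_emod (a b : Int) : cipherB a b = cipherB (a % 26) (b % 26) := by
  unfold cipherB
  rw [a_inverse_emod a]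
  cases a_inverse (a % 26) with
  | none => rfl
  | some n => exact congrArg (List.filterMap id) (scatterB_emod n b)

set_option maxHeartbeats 8000000 in
set_option maxRecDepth 10000 in
theorem finite_check : ∀ r ∈ List.range 26, ∀ s ∈ List.range 26,
    cipherA (r : Int) (s : Int) = cipherB (r : Int) (s : Int) := by decide

theorem cipher_eq (a b : Int) : cipherA a b = cipherB a b := by
  rw [cipherA_emod, cipherB_emod]
  have ha : (0:Int) ≤ a % 26 := Int.emod_nonneg a (by norm_num)
  have ha' : a % 26 < 26 := Int.emod_lt_of_pos a (by norm_num)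
  have hb : (0:Int) ≤ b % 26 := Int.emod_nonneg b (by norm_num)
  have hb' : b % 26 < 26 := Int.emod_lt_of_pos b (by norm_num)
  have := finite_check (a % 26).toNat
    (List.mem_range.mpr (by omega)) (b % 26).toNat (List.mem_range.mpr (by omega))
  rwa [Int.toNat_of_nonneg ha, Int.toNat_of_nonneg hb] at this

-- ===== VERDICT (by name: the statement is the Claim_ definition above) =====
theorem affine_alph_decrypt_spec : Claim_equal_affine_alph_decrypt := by
  intro a b _ _
  unfold Spec_affine_alph_decrypt affine_alph_decrypt affine_alph_decrypt_alt
  rw [cipher_eq]
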